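-- pv_equiv track=rewrite | github.com/tokusumi/nlp-jp-gears | nlp_jp_gears/zenhan.py | get_han_to_zen_dic
-- ===== SOURCE A (Python) =====
-- from typing import Optional, List, Callable, Dict, Iterator
--
-- def get_han_to_zen_dic(
--     targets: Optional[List[str]] = None,
--     excludes: Optional[List[str]] = None,
--     symbol: bool = True,
--     number: bool = True,
--     alphabet: bool = True,
-- ) -> Dict[str, str]:
--     """
--     Convert Japanese "hankaku" symbols into "zenkaku" symbols
--     Supports:
--         !"#$%&'()*+,-./:;<=>?@[\]^_`{|}~
--         0123456789
--         ABCDEFGHIJKLMNOPQRSTUVWXYZ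
--         abcdefghijklmnopqrstuvwxyz
--
--     Args:
--         targets: declaire target characters. if None (default), all support characters is converted.
--         excludes: declaire characters to keep format.
--         symbol: if True (default), symbol is converted.
--         number: if True (default), number is converted.
--         alphabet: if True (default), alphabet is converted.
--     """
--     tar = tuple(targets) if targets else {}
--     exc = tuple(excludes) if excludes else {}
--     dic = {chr(0x21 + i): chr(0xFF01 + i) for i in _range(symbol, number, alphabet)}
--     if tar:
--         dic = {key: val for key, val in dic.items() if key in tar}
--     if exc:
--         dic = {key: val for key, val in dic.items() if key not in exc}
--
--     return dic
--
-- def _range(symbol: bool, number: bool, alphabet: bool) -> Iterator[int]: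
--     if symbol:
--         for i in range(15):
--             yield i
--         for i in range(25, 32):
--             yield i
--         for i in range(58, 64):
--             yield i
--         for i in range(90, 94):
--             yield i
--     if number:
--         for i in range(15, 25):
--             yield i
--     if alphabet:
--         for i in range(32, 58):
--             yield i
--         for i in range(64, 90):
--             yield i
-- ===== SOURCE B (Python) =====
-- def get_han_to_zen_dic(
--     targets=None,
--     excludes=None,
--     symbol=True,
--     number=True,
--     alphabet=True,
-- ):
--     """Classify each ASCII char 0x21..0x7E by isdigit/isalpha instead of
--     hardcoded index ranges, and apply targets/excludes in one pass."""
--     pairs = [(chr(0x21 + i), chr(0xFF01 + i)) for i in range(94)]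
--     symbols = [p for p in pairs if not p[0].isalnum()]
--     numbers = [p for p in pairs if p[0].isdigit()]
--     alphas = [p for p in pairs if p[0].isalpha()]
--     selected = (
--         (symbols if symbol else [])
--         + (numbers if number else [])
--         + (alphas if alphabet else [])
--     )
--     return {
--         h: z
--         for h, z in selected
--         if (not targets or h in targets) and (not excludes or h not in excludes)
--     }
-- ===== Notes on version B (the rewrite author's own statement) =====
-- stated objective: idiomatic
-- what changed: Replaces the hardcoded per-category index-range generator and the successive dict rebuilds with per-character classification (isdigit/isalpha/isalnum) over the 94 ASCII codes and a single comprehension that applies the targets/excludes filters in one pass.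
import Mathlib
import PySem

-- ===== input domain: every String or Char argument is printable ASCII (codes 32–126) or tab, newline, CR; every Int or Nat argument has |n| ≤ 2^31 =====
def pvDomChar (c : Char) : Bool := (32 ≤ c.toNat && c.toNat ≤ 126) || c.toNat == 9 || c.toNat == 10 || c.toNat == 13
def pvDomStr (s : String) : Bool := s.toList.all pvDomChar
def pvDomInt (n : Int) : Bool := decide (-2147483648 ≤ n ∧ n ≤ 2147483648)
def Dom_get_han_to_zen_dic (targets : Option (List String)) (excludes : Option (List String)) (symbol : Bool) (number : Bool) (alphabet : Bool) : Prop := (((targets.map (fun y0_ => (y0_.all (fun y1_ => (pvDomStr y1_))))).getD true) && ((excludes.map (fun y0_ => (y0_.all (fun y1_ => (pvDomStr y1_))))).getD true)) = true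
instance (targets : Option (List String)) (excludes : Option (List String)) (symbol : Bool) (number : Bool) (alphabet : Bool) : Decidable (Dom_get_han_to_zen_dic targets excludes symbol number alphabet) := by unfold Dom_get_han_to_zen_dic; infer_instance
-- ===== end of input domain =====

-- B replaces the hardcoded per-category index-range generator and the two successive dict
-- rebuilds of A with per-character classification (isdigit/isalpha/isalnum) over the 94
-- ASCII codes and one comprehension applying the targets/excludes filters in a single pass.


-- ===== PORT A =====
-- chr(i) for 0 ≤ i (both ports call it only on 0x21+i / 0xFF01+i with 0 ≤ i < 94)
def pvChr (i : Int) : String := String.ofList [Char.ofNat i.toNat]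

-- the generator _range(symbol, number, alphabet), yielded in order, as a list
def pvRangeA (symbol number alphabet : Bool) : List Int :=
  (if symbol then
      PySem.List.pyRange 0 15 1 ++ PySem.List.pyRange 25 32 1 ++
      PySem.List.pyRange 58 64 1 ++ PySem.List.pyRange 90 94 1
    else []) ++
  (if number then PySem.List.pyRange 15 25 1 else []) ++
  (if alphabet then PySem.List.pyRange 32 58 1 ++ PySem.List.pyRange 64 90 1 else [])

-- a dict comprehension over a list of (key, value) pairs (used by both ports)
def pvDictOf (l : List (String × String)) : PySem.Dict String String :=
  l.foldl (fun d p => d.insert p.1 p.2) PySem.Dict.empty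

-- 'tar = tuple(targets) if targets else {}': the falsy branch {} is an empty container
-- (membership always false, falsy), modelled — like the falsy inputs None and [] — as [].
def get_han_to_zen_dic (targets : Option (List String)) (excludes : Option (List String)) (symbol : Bool) (number : Bool) (alphabet : Bool) : List (String × String) :=
  let tar : List String := match targets with | some l => l | none => []
  let exc : List String := match excludes with | some l => l | none => []
  let dic := pvDictOf ((pvRangeA symbol number alphabet).map
               (fun i => (pvChr (0x21 + i), pvChr (0xFF01 + i))))
  let dic := if tar ≠ [] then pvDictOf (dic.items.filter (fun p => tar.contains p.1)) else dic
  let dic := if exc ≠ [] then pvDictOf (dic.items.filter (fun p => !(exc.contains p.1))) else dic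
  dic.items

-- ===== PORT B =====  (shares the generic primitives pvChr / pvDictOf with port A)
def get_han_to_zen_dic_alt (targets : Option (List String)) (excludes : Option (List String)) (symbol : Bool) (number : Bool) (alphabet : Bool) : List (String × String) :=
  let pairs := (PySem.List.pyRange 0 94 1).map (fun i => (pvChr (0x21 + i), pvChr (0xFF01 + i)))
  let symbols := pairs.filter (fun p => !(PySem.Str.strIsalnum p.1))
  let numbers := pairs.filter (fun p => PySem.Str.strIsdigit p.1)
  let alphas := pairs.filter (fun p => PySem.Str.strIsalpha p.1)
  let selected := (if symbol then symbols else []) ++ (if number then numbers else []) ++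
                  (if alphabet then alphas else [])
  (pvDictOf (selected.filter (fun p =>
      (match targets with | none => true | some l => decide (l = []) || l.contains p.1) &&
      (match excludes with | none => true | some l => decide (l = []) || !(l.contains p.1))))).items

-- ===== PRECONDITION & SPEC =====
def Spec_get_han_to_zen_dic (targets : Option (List String)) (excludes : Option (List String)) (symbol : Bool) (number : Bool) (alphabet : Bool) (out : List (String × String)) : Prop := out = get_han_to_zen_dic_alt targets excludes symbol number alphabet
instance (targets : Option (List String)) (excludes : Option (List String)) (symbol : Bool) (number : Bool) (alphabet : Bool) (out : List (String × String)) : Decidable (Spec_get_han_to_zen_dic targets excludes symbol number alphabet out) := by unfold Spec_get_han_to_zen_dic; infer_instance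

-- ===== CLAIM (what is proved, stated in full; the proofs are below) =====
def Claim_equal_get_han_to_zen_dic : Prop := ∀ (targets : Option (List String)) (excludes : Option (List String)) (symbol : Bool) (number : Bool) (alphabet : Bool), Dom_get_han_to_zen_dic targets excludes symbol number alphabet → Spec_get_han_to_zen_dic targets excludes symbol number alphabet (get_han_to_zen_dic targets excludes symbol number alphabet)

-- ===== LEMMAS AND PROOFS =====

-- A's index blocks, mapped to pairs, coincide with B's classified blocks (8 closed cases)
lemma pv_base_eq (s n a : Bool) :
    (pvRangeA s n a).map (fun i => (pvChr (0x21 + i), pvChr (0xFF01 + i))) =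
      ((if s then ((PySem.List.pyRange 0 94 1).map (fun i => (pvChr (0x21 + i), pvChr (0xFF01 + i)))).filter (fun p => !(PySem.Str.strIsalnum p.1)) else []) ++
       (if n then ((PySem.List.pyRange 0 94 1).map (fun i => (pvChr (0x21 + i), pvChr (0xFF01 + i)))).filter (fun p => PySem.Str.strIsdigit p.1) else [])) ++
      (if a then ((PySem.List.pyRange 0 94 1).map (fun i => (pvChr (0x21 + i), pvChr (0xFF01 + i)))).filter (fun p => PySem.Str.strIsalpha p.1) else []) := by
  cases s <;> cases n <;> cases a <;> decide

lemma pv_keys_nodup (s n a : Bool) :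
    (((pvRangeA s n a).map (fun i => (pvChr (0x21 + i), pvChr (0xFF01 + i)))).map Prod.fst).Nodup := by
  cases s <;> cases n <;> cases a <;> decide

-- a dict comprehension over pairs with distinct keys has exactly those pairs as items
lemma pv_items_dictOf (l : List (String × String)) (h : (l.map Prod.fst).Nodup) :
    (pvDictOf l).items = l := by
  unfold pvDictOf
  rw [PySem.Dict.items_foldl_insert_fresh (k := Prod.fst) (v := Prod.snd)
        (d := PySem.Dict.empty) (l := l) (by intro a _; exact PySem.Dict.contains_empty _) h]
  simp [show (PySem.Dict.empty : PySem.Dict String String).items = [] from rfl]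

lemma pv_filter_keys_nodup (l : List (String × String)) (q : String × String → Bool)
    (h : (l.map Prod.fst).Nodup) : ((l.filter q).map Prod.fst).Nodup :=
  h.sublist (List.Sublist.map _ List.filter_sublist)

-- ===== VERDICT (by name: the statement is the Claim_ definition above) =====
theorem get_han_to_zen_dic_spec : Claim_equal_get_han_to_zen_dic := by
  intro targets excludes s n a _
  unfold Spec_get_han_to_zen_dic get_han_to_zen_dic get_han_to_zen_dic_alt
  dsimp only
  set L := (pvRangeA s n a).map (fun i => (pvChr (0x21 + i), pvChr (0xFF01 + i))) with hL
  have hnd : (L.map Prod.fst).Nodup := pv_keys_nodup s n a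
  rw [← pv_base_eq s n a]
  have hbase : (pvDictOf L).items = L := pv_items_dictOf L hnd
  have hitems : ∀ q : String × String → Bool,
      (pvDictOf (L.filter q)).items = L.filter q :=
    fun q => pv_items_dictOf _ (pv_filter_keys_nodup L q hnd)
  rcases targets with _ | tl <;> rcases excludes with _ | el
  · simp [hbase, List.filter_true, ← hL]
  · by_cases he : el = []
    · subst he; simp [hbase, List.filter_true, ← hL]
    · simp [he, hbase, hitems, ← hL]
  · by_cases ht : tl = []
    · subst ht; simp [hbase, List.filter_true, ← hL]
    · simp [ht, hbase, hitems, ← hL]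
  · by_cases ht : tl = [] <;> by_cases he : el = []
    · subst ht; subst he; simp [hbase, List.filter_true, ← hL]
    · subst ht; simp [he, hbase, hitems, ← hL]
    · subst he; simp [ht, hbase, hitems, ← hL]
    · simp [ht, he, hbase, hitems, List.filter_filter, ← hL, Bool.and_comm]
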